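-- pv_equiv track=rewrite | github.com/nseptio/leetcode-practice | 2108-find-first-palindromic-string-in-the-array/2108-find-first-palindromic-string-in-the-array.py | firstPalindrome
-- ===== SOURCE A (Python) =====
-- from typing import List
--
-- def firstPalindrome(words: List[str]) -> str:
--     def is_palindrome(s):
--         left = 0
--         right = len(s) - 1
--
--         while left < right:
--             if s[left] != s[right]:
--                 return False
--             left += 1
--             right -= 1
--
--         return True
--
--     for i in words:
--         if is_palindrome(i):
--             return i
--     return  ""
-- ===== SOURCE B (Python) =====
-- def firstPalindrome(words):
--     return next((w for w in words if w == w[::-1]), "")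
-- ===== Notes on version B (the rewrite author's own statement) =====
-- stated objective: idiomatic
-- what changed: Replaces the hand-written two-pointer index walk with a reverse-and-compare test (w == w[::-1]) and expresses the scan as next() over a generator with a default instead of an explicit loop with early return.
import Mathlib
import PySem

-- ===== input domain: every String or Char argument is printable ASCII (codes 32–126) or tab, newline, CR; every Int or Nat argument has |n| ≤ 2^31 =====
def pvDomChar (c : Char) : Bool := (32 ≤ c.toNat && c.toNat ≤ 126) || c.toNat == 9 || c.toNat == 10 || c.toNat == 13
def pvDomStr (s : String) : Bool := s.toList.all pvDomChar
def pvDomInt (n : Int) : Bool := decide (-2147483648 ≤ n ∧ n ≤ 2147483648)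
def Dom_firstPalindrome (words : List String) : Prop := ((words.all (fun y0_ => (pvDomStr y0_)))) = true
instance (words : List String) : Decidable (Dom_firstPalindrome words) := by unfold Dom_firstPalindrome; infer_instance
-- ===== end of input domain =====

-- B replaces A's hand-written two-pointer palindrome walk with a reverse-and-compare
-- test and a first-match scan with default "" (idiomatic; same cost).


-- ===== PORT A =====
-- A's inner helper is_palindrome: while left < right walk inward, early exit on mismatch
def isPalA (cs : List Char) (left right : Int) : Bool :=
  if left < right then
    if PySem.List.pyGet? cs left ≠ PySem.List.pyGet? cs right then false
    else isPalA cs (left + 1) (right - 1)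
  else true
termination_by (right - left).toNat
decreasing_by omega

def firstPalindrome (words : List String) : String :=
  match words with
  | [] => ""
  | w :: ws => if isPalA w.toList 0 ((w.toList.length : Int) - 1) then w else firstPalindrome ws

-- ===== PORT B =====
-- Source B: next((w for w in words if w == w[::-1]), "")  — first match with default ""
def firstPalindrome_alt (words : List String) : String :=
  (words.find? (fun w => w.toList.reverse == w.toList)).getD ""

-- ===== PRECONDITION & SPEC =====
def Spec_firstPalindrome (words : List String) (out : String) : Prop := out = firstPalindrome_alt words
instance (words : List String) (out : String) : Decidable (Spec_firstPalindrome words out) := by unfold Spec_firstPalindrome; infer_instance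

-- ===== CLAIM (what is proved, stated in full; the proofs are below) =====
def Claim_equal_firstPalindrome : Prop := ∀ (words : List String), Dom_firstPalindrome words → Spec_firstPalindrome words (firstPalindrome words)

-- ===== LEMMAS AND PROOFS =====

-- characterisation of the two-pointer loop: all opposite pairs strictly inside [l, r] agree
theorem isPalA_iff (cs : List Char) (l r : Int) (hl : 0 ≤ l) (hr : r < (cs.length : Int)) :
    isPalA cs l r = true ↔
      ∀ i j : Int, l ≤ i → i < j → j ≤ r → i + j = l + r →
        PySem.List.pyGet? cs i = PySem.List.pyGet? cs j := by
  rw [isPalA]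
  by_cases hlr : l < r
  · rw [if_pos hlr]
    by_cases hne : PySem.List.pyGet? cs l = PySem.List.pyGet? cs r
    · rw [if_neg (by simpa using hne)]
      rw [isPalA_iff cs (l + 1) (r - 1) (by omega) (by omega)]
      constructor
      · intro H i j hi hij hjr hsum
        by_cases hil : i = l
        · have hjr' : j = r := by omega
          subst hil; subst hjr'; exact hne
        · exact H i j (by omega) hij (by omega) (by omega)
      · intro H i j hi hij hjr hsum
        exact H i j (by omega) hij (by omega) (by omega)
    · rw [if_pos hne]
      simp only [Bool.false_eq_true, false_iff, not_forall]
      exact ⟨l, r, le_rfl, hlr, le_rfl, rfl, hne⟩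
  · rw [if_neg hlr]
    constructor
    · intro _ i j hi hij hjr hsum
      exact absurd hij (by omega)
    · intro _; rfl
termination_by (r - l).toNat
decreasing_by omega

-- the two-pointer check on [0, len-1] is reverse-and-compare
theorem isPalA_eq_rev (cs : List Char) :
    isPalA cs 0 ((cs.length : Int) - 1) = (cs.reverse == cs) := by
  have hiff := isPalA_iff cs 0 ((cs.length : Int) - 1) (by omega) (by omega)
  have hrev : cs.reverse = cs ↔
      ∀ i : Nat, i < cs.length → cs[cs.length - 1 - i]? = cs[i]? := by
    constructor
    · intro h i hi
      rw [← List.getElem?_reverse hi, h]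
    · intro h
      apply List.ext_getElem?
      intro i
      by_cases hi : i < cs.length
      · rw [List.getElem?_reverse hi]
        exact h i hi
      · rw [List.getElem?_eq_none (by simpa using le_of_not_gt hi),
          List.getElem?_eq_none (le_of_not_gt hi)]
  rw [Bool.eq_iff_iff, hiff, beq_iff_eq, hrev]
  constructor
  · intro H i hi
    rcases lt_trichotomy i (cs.length - 1 - i) with hlt | heq | hgt
    · have := H (i : Int) ((cs.length - 1 - i : Nat) : Int)
        (by omega) (by omega) (by omega) (by omega)
      rw [PySem.List.pyGet?_natCast, PySem.List.pyGet?_natCast] at this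
      exact this.symm
    · rw [← heq]
    · have := H ((cs.length - 1 - i : Nat) : Int) (i : Int)
        (by omega) (by omega) (by omega) (by omega)
      rw [PySem.List.pyGet?_natCast, PySem.List.pyGet?_natCast] at this
      exact this
  · intro H i j hi hij hjr hsum
    have hjn : j.toNat < cs.length := by omega
    have heqn : cs.length - 1 - j.toNat = i.toNat := by omega
    rw [PySem.List.pyGet?_of_nonneg cs hi, PySem.List.pyGet?_of_nonneg cs (by omega)]
    exact heqn ▸ H j.toNat hjn

-- ===== VERDICT (by name: the statement is the Claim_ definition above) =====
theorem firstPalindrome_spec : Claim_equal_firstPalindrome := by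
  intro words hd
  unfold Spec_firstPalindrome
  induction words with
  | nil => rfl
  | cons w ws ih =>
      have hd2 : Dom_firstPalindrome ws := by
        have := hd; simp only [Dom_firstPalindrome, List.all_cons, Bool.and_eq_true] at this
        exact this.2
      simp only [firstPalindrome, firstPalindrome_alt, List.find?_cons, isPalA_eq_rev]
      cases h : (w.toList.reverse == w.toList) <;>
        simp [ih hd2, firstPalindrome_alt]
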